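-- pv_equiv track=rewrite | github.com/nihilistau/shannon-prime | tools/sp_compress.py | sqfree_pad_dim
-- ===== SOURCE A (Python) =====
-- SQFREE_PAD = {64: 66, 96: 110, 128: 154, 256: 330}
--
-- def sqfree_pad_dim(head_dim: int) -> int:
--     if head_dim in SQFREE_PAD:
--         return SQFREE_PAD[head_dim]
--     n = head_dim
--     while n < head_dim * 2:
--         d = n
--         distinct = 0
--         is_sq = True
--         for p in [2, 3, 5, 7, 11]:
--             if d % p == 0:
--                 distinct += 1
--                 d //= p
--                 if d % p == 0:
--                     is_sq = False
--                     break
--         if is_sq and d == 1 and distinct >= 3: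
--             return n
--         n += 1
--     return head_dim
-- ===== SOURCE B (Python) =====
-- _SQFREE_PAD = {64: 66, 96: 110, 128: 154, 256: 330}
--
-- # All products of >=3 distinct primes from {2,3,5,7,11}, sorted ascending.
-- _PADS = [30, 42, 66, 70, 105, 110, 154, 165, 210, 231, 330, 385, 462, 770, 1155, 2310]
--
--
-- def sqfree_pad_dim(head_dim: int) -> int:
--     if head_dim in _SQFREE_PAD:
--         return _SQFREE_PAD[head_dim]
--     return next((p for p in _PADS if head_dim <= p < 2 * head_dim), head_dim)
-- ===== Notes on version B (the rewrite author's own statement) =====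
-- stated objective: faster
-- what changed: Replaces the per-candidate trial-division scan over the interval [head_dim, head_dim*2) with a scan of a small fixed precomputed table of all valid pad values (products of at least three distinct primes among {2,3,5,7,11}), returning the first one in range.
import Mathlib
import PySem

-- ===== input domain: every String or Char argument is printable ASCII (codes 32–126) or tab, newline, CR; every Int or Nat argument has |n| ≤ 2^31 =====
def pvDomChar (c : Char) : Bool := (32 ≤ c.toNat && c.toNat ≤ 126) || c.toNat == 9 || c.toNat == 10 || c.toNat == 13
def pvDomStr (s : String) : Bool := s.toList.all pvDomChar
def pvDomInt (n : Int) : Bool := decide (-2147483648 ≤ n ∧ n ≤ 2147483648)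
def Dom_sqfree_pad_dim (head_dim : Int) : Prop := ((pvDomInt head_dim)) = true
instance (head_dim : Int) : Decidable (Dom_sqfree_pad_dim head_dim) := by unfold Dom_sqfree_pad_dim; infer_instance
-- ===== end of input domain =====

-- B replaces A's trial-division scan over [head_dim, 2*head_dim) by a scan of the 16
-- precomputed valid pad values (objective: faster).

-- ===== PORT A =====
def SQFREE_PAD_A : PySem.Dict Int Int := PySem.Dict.ofList [(64, 66), (96, 110), (128, 154), (256, 330)]

-- the inner 'for p in [2,3,5,7,11]' loop with its break: returns (d, distinct, is_sq)
def innerA : List Int → Int → Int → Int × Int × Bool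
  | [], d, distinct => (d, distinct, true)
  | p :: ps, d, distinct =>
    if PySem.Int.mod d p = 0 then
      let d' := PySem.Int.floordiv d p
      if PySem.Int.mod d' p = 0 then (d', distinct + 1, false)
      else innerA ps d' (distinct + 1)
    else innerA ps d distinct

def checkA (n : Int) : Bool :=
  let r := innerA [2, 3, 5, 7, 11] n 0
  r.2.2 && r.1 == 1 && decide (r.2.1 ≥ 3)

def loopA (head_dim n : Int) : Int :=
  if _h : n < head_dim * 2 then
    if checkA n then n else loopA head_dim (n + 1)
  else head_dim
termination_by (head_dim * 2 - n).toNat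
decreasing_by omega

def sqfree_pad_dim (head_dim : Int) : Int :=
  match SQFREE_PAD_A.get? head_dim with
  | some v => v
  | none => loopA head_dim head_dim

-- ===== PORT B =====
def SQFREE_PAD_B : PySem.Dict Int Int := PySem.Dict.ofList [(64, 66), (96, 110), (128, 154), (256, 330)]

def padsB : List Int := [30, 42, 66, 70, 105, 110, 154, 165, 210, 231, 330, 385, 462, 770, 1155, 2310]

def sqfree_pad_dim_alt (head_dim : Int) : Int :=
  match SQFREE_PAD_B.get? head_dim with
  | some v => v
  | none =>
    (padsB.find? (fun p => decide (head_dim ≤ p) && decide (p < 2 * head_dim))).getD head_dim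

-- ===== PRECONDITION & SPEC =====
def Spec_sqfree_pad_dim (head_dim : Int) (out : Int) : Prop := out = sqfree_pad_dim_alt head_dim
instance (head_dim : Int) (out : Int) : Decidable (Spec_sqfree_pad_dim head_dim out) := by unfold Spec_sqfree_pad_dim; infer_instance

-- ===== CLAIM (what is proved, stated in full; the proofs are below) =====
def Claim_equal_sqfree_pad_dim : Prop := ∀ (head_dim : Int), Dom_sqfree_pad_dim head_dim → Spec_sqfree_pad_dim head_dim (sqfree_pad_dim head_dim)

-- ===== LEMMAS AND PROOFS =====

-- one step of the inner loop, with // and % turned into Lean's ediv/emod (divisor positive)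
lemma innerA_step (p : Int) (hp : 0 < p) (ps : List Int) (d distinct : Int) :
    innerA (p :: ps) d distinct =
      if d % p = 0 then
        if (d / p) % p = 0 then (d / p, distinct + 1, false)
        else innerA ps (d / p) (distinct + 1)
      else innerA ps d distinct := by
  simp only [innerA, PySem.Int.mod_eq_emod_of_pos hp, PySem.Int.floordiv_eq_ediv_of_pos hp]

-- if the inner loop finishes without break, the divided-out primes form a sublist
lemma innerA_true {ps : List Int} (hps : ∀ p ∈ ps, 0 < p) :
    ∀ d c d' c', innerA ps d c = (d', c', true) →
      ∃ S : List Int, S.Sublist ps ∧ d = d' * S.prod ∧ c' = c + S.length := by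
  induction ps with
  | nil =>
    intro d c d' c' h
    simp only [innerA, Prod.mk.injEq] at h
    exact ⟨[], List.Sublist.refl _, by simp [h.1], by simp [h.2.1]⟩
  | cons p ps ih =>
    intro d c d' c' h
    have hp : 0 < p := hps p (by simp)
    rw [innerA_step p hp] at h
    split_ifs at h with h1 h2
    · simp at h
    · obtain ⟨S, hS, hd, hc⟩ :=
        ih (fun q hq => hps q (by simp [hq])) (d / p) (c + 1) d' c' h
      refine ⟨p :: S, List.Sublist.cons₂ _ hS, ?_, by simp [hc]; omega⟩
      have hdvd : p ∣ d := Int.dvd_of_emod_eq_zero h1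
      have : d / p * p = d := Int.ediv_mul_cancel hdvd
      rw [List.prod_cons]
      nlinarith [this, hd]
    · obtain ⟨S, hS, hd, hc⟩ :=
        ih (fun q hq => hps q (by simp [hq])) d c d' c' h
      exact ⟨S, hS.cons _, hd, hc⟩

-- A's per-candidate check accepts exactly the 16 precomputed pad values.
lemma checkA_iff_mem (n : Int) : checkA n = true ↔ n ∈ padsB := by
  constructor
  · intro h
    unfold checkA at h
    rcases he : innerA [2, 3, 5, 7, 11] n 0 with ⟨a, b, c⟩
    rw [he] at h
    simp only [Bool.and_eq_true, beq_iff_eq, decide_eq_true_eq] at h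
    obtain ⟨⟨hc, ha⟩, hb⟩ := h
    subst hc ha
    obtain ⟨S, hS, hd, hlen⟩ :=
      innerA_true (ps := [2, 3, 5, 7, 11]) (by decide) n 0 1 b he
    have hmem := (List.mem_sublists).mpr hS
    fin_cases hmem <;> simp_all [padsB]
  · intro h
    fin_cases h <;> decide

lemma find?_congr' {α : Type} (l : List α) (p q : α → Bool)
    (h : ∀ a ∈ l, p a = q a) : l.find? p = l.find? q := by
  induction l with
  | nil => rfl
  | cons x xs ih =>
    simp only [List.find?]
    rw [h x (by simp)]
    cases q x
    · exact ih (fun a ha => h a (by simp [ha]))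
    · rfl

lemma find?_self_of_mem (hd n : Int) (hmem : n ∈ padsB) (hlt : n < hd * 2) :
    padsB.find? (fun p => decide (n ≤ p) && decide (p < 2 * hd)) = some n := by
  have h2 : n < 2 * hd := by omega
  fin_cases hmem <;> simp_all [padsB, List.find?]

lemma loopA_eq (hd n : Int) :
    loopA hd n = (padsB.find? (fun p => decide (n ≤ p) && decide (p < 2 * hd))).getD hd := by
  unfold loopA
  split_ifs with h1 h2
  · -- checkA n = true
    rw [find?_self_of_mem hd n ((checkA_iff_mem n).mp h2) h1]; rfl
  · -- checkA n = false: step to n+1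
    have hnm : n ∉ padsB := fun hm => by simp [(checkA_iff_mem n).mpr hm] at h2
    rw [loopA_eq hd (n + 1)]
    congr 1
    apply find?_congr'
    intro a ha
    have : a ≠ n := fun he => hnm (he ▸ ha)
    rw [decide_eq_decide.mpr (show (n ≤ a) ↔ (n + 1 ≤ a) by
      constructor <;> intro _ <;> omega)]
  · -- n ≥ hd * 2: no candidate in range
    rw [List.find?_eq_none.mpr ?_]
    · rfl
    · intro p _
      simp only [Bool.and_eq_true, decide_eq_true_eq, not_and]
      omega
termination_by (hd * 2 - n).toNat
decreasing_by omega

-- ===== VERDICT (by name: the statement is the Claim_ definition above) =====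
theorem sqfree_pad_dim_spec : Claim_equal_sqfree_pad_dim := by
  intro hd _
  unfold Spec_sqfree_pad_dim sqfree_pad_dim sqfree_pad_dim_alt
  have hde : SQFREE_PAD_A = SQFREE_PAD_B := rfl
  rw [hde]
  cases h : SQFREE_PAD_B.get? hd with
  | some v => rfl
  | none => simpa using loopA_eq hd hd
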